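-- pv_equiv track=rewrite | github.com/Dibbyo1/SDMatch-Shine-Dalgarno-Sequence-Analyzer | saha_dibbyo_assignment3_code.py | shine_dalgarno
-- ===== SOURCE A (Python) =====
-- def find_mismatches(sequence, target):
--     mismatches = 0
--     for i, j in zip(sequence, target):
--         if i != j:
--             mismatches +=1
--     return mismatches
--
-- def shine_dalgarno(sequence):
--     target = 'AGGAGG'
--     minimum_mismatches = float('inf')
--     best_position = None
--     best_segment = None
--     for i in range(17 - len(target) +1):
--         segment = sequence[i:i+len(target)]
--         mismatches = find_mismatches(segment, target)
--         if mismatches < minimum_mismatches: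
--             minimum_mismatches = mismatches
--             best_position = i
--             best_segment = segment
--         elif mismatches == minimum_mismatches:
--             best_position = None
--             best_segment = None
--     return best_segment, minimum_mismatches, best_position
-- ===== SOURCE B (Python) =====
-- def shine_dalgarno(sequence):
--     target = 'AGGAGG'
--     counts = [sum(a != b for a, b in zip(sequence[i:i+6], target)) for i in range(12)]
--     min_val = min(counts)
--     if counts.count(min_val) != 1:
--         return None, min_val, None
--     p = counts.index(min_val)
--     return sequence[p:p+6], min_val, p
-- ===== Notes on version B (the rewrite author's own statement) =====
-- stated objective: simpler
-- what changed: A's single pass with running-minimum/tie-reset state is replaced by a plain decomposition: build the 12 window mismatch counts, then combine min(counts), counts.count(min) and counts.index(min) to decide uniqueness and position.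
import Mathlib
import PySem

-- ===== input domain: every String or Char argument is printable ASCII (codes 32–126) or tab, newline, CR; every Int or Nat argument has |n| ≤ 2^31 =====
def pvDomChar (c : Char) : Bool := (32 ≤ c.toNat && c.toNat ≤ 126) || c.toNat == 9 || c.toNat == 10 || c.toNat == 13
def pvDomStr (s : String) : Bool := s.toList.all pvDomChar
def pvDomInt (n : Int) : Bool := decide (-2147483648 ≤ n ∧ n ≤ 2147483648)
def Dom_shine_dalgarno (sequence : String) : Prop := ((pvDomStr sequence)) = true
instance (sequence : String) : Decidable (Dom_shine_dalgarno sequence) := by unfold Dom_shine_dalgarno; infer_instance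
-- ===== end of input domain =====

-- B replaces A's running best/tie-reset state machine by a plain decomposition:
-- build the 12 window mismatch counts, then take min / count / index (objective: simpler; same cost).

-- ===== PORT A =====
-- for i, j in zip(sequence, target): if i != j: mismatches += 1
def find_mismatches (sequence target : List Char) : Int :=
  (sequence.zip target).foldl
    (fun mismatches ij => if ij.1 != ij.2 then mismatches + 1 else mismatches) 0

-- literal port; len(target) = 6 is written as the numeral 6, as in `17 - 6 + 1`
def shine_dalgarno (sequence : String) : Option String × Int × Option Int :=
  let st := (PySem.List.pyRange 0 (17 - 6 + 1) 1).foldl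
    (fun (st : Option Int × Option Int × Option (List Char)) i =>
      let segment := PySem.List.slice sequence.toList (some i) (some (i + 6))
      let mismatches := find_mismatches segment "AGGAGG".toList
      match st.1 with
      | none => (some mismatches, some i, some segment)  -- mismatches < float('inf') always
      | some mm =>
        if mismatches < mm then (some mismatches, some i, some segment)
        else if mismatches = mm then (some mm, none, none)
        else st)
    (none, none, none)
  (st.2.2.map String.ofList, st.1.getD 0, st.2.1)

-- ===== PORT B =====
def shine_dalgarno_alt (sequence : String) : Option String × Int × Option Int :=
  let counts : List Int := (PySem.List.pyRange 0 12 1).map (fun i =>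
    (((PySem.List.slice sequence.toList (some i) (some (i + 6))).zip "AGGAGG".toList).map
      (fun ab => if ab.1 != ab.2 then (1 : Int) else 0)).sum)
  let minVal := (PySem.List.min? counts (fun x => x)).getD 0
  if PySem.List.count counts minVal ≠ 1 then (none, minVal, none)
  else
    match PySem.List.index? counts minVal with
    | some p => (some (String.ofList (PySem.List.slice sequence.toList (some (p : Int)) (some ((p : Int) + 6)))), minVal, some (p : Int))
    | none => (none, minVal, none)

-- ===== PRECONDITION & SPEC =====
def Spec_shine_dalgarno (sequence : String) (out : Option String × Int × Option Int) : Prop := out = shine_dalgarno_alt sequence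
instance (sequence : String) (out : Option String × Int × Option Int) : Decidable (Spec_shine_dalgarno sequence out) := by unfold Spec_shine_dalgarno; infer_instance

-- ===== CLAIM (what is proved, stated in full; the proofs are below) =====
def Claim_equal_shine_dalgarno : Prop := ∀ (sequence : String), Dom_shine_dalgarno sequence → Spec_shine_dalgarno sequence (shine_dalgarno sequence)

-- ===== LEMMAS AND PROOFS =====

-- mismatch count of window i (the value both programs compute per window)
def sdC (L : List Char) (i : Int) : Int :=
  (((PySem.List.slice L (some i) (some (i + 6))).zip "AGGAGG".toList).countP
    (fun ab => ab.1 != ab.2) : Nat)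

-- running minimum over windows 0..n and the uniquely-minimal position (if any)
def sdM (L : List Char) : Nat → Int
  | 0 => sdC L 0
  | n+1 => if sdC L ((n:Int)+1) < sdM L n then sdC L ((n:Int)+1) else sdM L n

def sdP (L : List Char) : Nat → Option Nat
  | 0 => some 0
  | n+1 =>
    if sdC L ((n:Int)+1) < sdM L n then some (n+1)
    else if sdC L ((n:Int)+1) = sdM L n then none
    else sdP L n

def sdCs (L : List Char) (n : Nat) : List Int := (List.range n).map (fun k => sdC L (Nat.cast k))

lemma sdCs_succ (L : List Char) (n : Nat) : sdCs L (n+1) = sdCs L n ++ [sdC L (↑n)] := by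
  simp [sdCs, List.range_succ]

lemma sdCs_length (L : List Char) (n : Nat) : (sdCs L n).length = n := by simp [sdCs]

lemma sdCs_getElem (L : List Char) (n j : Nat) (h : j < n) :
    (sdCs L n)[j]'(by simp [sdCs_length, h]) = sdC L (↑j) := by
  unfold sdCs
  rw [List.getElem_map, List.getElem_range]

lemma find_mismatches_eq (L : List Char) (i : Int) :
    find_mismatches (PySem.List.slice L (some i) (some (i + 6))) "AGGAGG".toList = sdC L i := by
  unfold find_mismatches sdC
  rw [PySem.List.foldl_count_if]
  simp

lemma sdA_fold (s : String) (n : Nat) :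
    (PySem.List.pyRange 0 (↑(n+1)) 1).foldl
      (fun (st : Option Int × Option Int × Option (List Char)) i =>
        let segment := PySem.List.slice s.toList (some i) (some (i + 6))
        let mismatches := find_mismatches segment "AGGAGG".toList
        match st.1 with
        | none => (some mismatches, some i, some segment)
        | some mm =>
          if mismatches < mm then (some mismatches, some i, some segment)
          else if mismatches = mm then (some mm, none, none)
          else st)
      (none, none, none)
    = (some (sdM s.toList n), (sdP s.toList n).map (fun k => (k : Int)),
       (sdP s.toList n).map (fun k => PySem.List.slice s.toList (some (k : Int)) (some ((k : Int) + 6)))) := by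
  induction n with
  | zero =>
    have h0 : ((0+1 : Nat) : Int) = 1 := by norm_num
    have h1 : PySem.List.pyRange 0 1 1 = [0] := by decide
    rw [h0, h1]
    simp only [List.foldl_cons, List.foldl_nil]
    rw [find_mismatches_eq]
    simp [sdM, sdP]
  | succ n ih =>
    have hc : ((↑(n+1+1)) : Int) = (↑(n+1) : Int) + 1 := by push_cast; ring
    rw [hc, PySem.List.pyRange_one_succ_right (by positivity), List.foldl_append, ih]
    simp only [List.foldl]
    rw [find_mismatches_eq]
    push_cast
    by_cases h1 : sdC s.toList ((n:Int)+1) < sdM s.toList n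
    · simp [h1, sdM, sdP]
    · by_cases h2 : sdC s.toList ((n:Int)+1) = sdM s.toList n
      · simp [h2, sdM, sdP]
      · simp [h1, h2, sdM, sdP]

lemma sdMin (L : List Char) (n : Nat) :
    PySem.List.min? (sdCs L (n+1)) (fun x => x) = some (sdM L n) := by
  induction n with
  | zero => simp [sdCs, PySem.List.min?, sdM]
  | succ n ih =>
    rw [sdCs_succ]
    unfold PySem.List.min? at ih ⊢
    rw [List.foldl_append, ih]
    simp only [List.foldl_cons, List.foldl_nil]
    push_cast
    simp only [sdM]
    split_ifs <;> rfl

lemma sdInv (L : List Char) (n : Nat) :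
    (∀ k : Nat, k ≤ n → sdM L n ≤ sdC L (↑k)) ∧
    (match sdP L n with
     | some p => List.count (sdM L n) (sdCs L (n+1)) = 1 ∧ List.idxOf? (sdM L n) (sdCs L (n+1)) = some p
     | none => 2 ≤ List.count (sdM L n) (sdCs L (n+1))) := by
  induction n with
  | zero =>
    refine ⟨?_, ?_⟩
    · intro k hk; interval_cases k; simp [sdM]
    · simp [sdP, sdCs, sdM]
  | succ n ih =>
    obtain ⟨ihle, ihm⟩ := ih
    have hsucc : sdCs L (n+1+1) = sdCs L (n+1) ++ [sdC L ((n:Int)+1)] := by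
      rw [sdCs_succ]; push_cast; rfl
    by_cases h1 : sdC L ((n:Int)+1) < sdM L n
    · have hM : sdM L (n+1) = sdC L ((n:Int)+1) := by simp [sdM, h1]
      have hP : sdP L (n+1) = some (n+1) := by simp [sdP, h1]
      have hnotmem : sdC L ((n:Int)+1) ∉ sdCs L (n+1) := by
        simp only [sdCs, List.mem_map, List.mem_range]
        rintro ⟨k, hk, he⟩
        have := ihle k (by omega); omega
      refine ⟨?_, ?_⟩
      · intro k hk
        rw [hM]
        rcases Nat.lt_succ_iff_lt_or_eq.mp (Nat.lt_succ_of_le hk) with hlt | heq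
        · have := ihle k (by omega); omega
        · subst heq; push_cast; omega
      · rw [hP, hM, hsucc]
        constructor
        · rw [List.count_append, List.count_eq_zero.mpr hnotmem]
          simp
        · refine List.idxOf?_eq_some_iff.mpr ⟨by simp [sdCs_length], ?_, ?_⟩
          · rw [List.getElem_append_right (by simp [sdCs_length])]
            simp [sdCs_length]
          · intro j hj
            rw [List.getElem_append_left (by simpa [sdCs_length] using hj)]
            have hle := ihle j (by omega)
            rw [sdCs_getElem L (n+1) j (by omega)]
            omega
    · have hM : sdM L (n+1) = sdM L n := by simp [sdM, h1]
      have hb : ∀ k : Nat, k ≤ n+1 → sdM L (n+1) ≤ sdC L (↑k) := by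
        intro k hk
        rw [hM]
        rcases Nat.lt_succ_iff_lt_or_eq.mp (Nat.lt_succ_of_le hk) with hlt | heq
        · exact ihle k (by omega)
        · subst heq; push_cast; omega
      by_cases h2 : sdC L ((n:Int)+1) = sdM L n
      · have hP : sdP L (n+1) = none := by simp [sdP, h2]
        refine ⟨hb, ?_⟩
        rw [hP, hM, hsucc]
        have hcnt : 1 ≤ List.count (sdM L n) (sdCs L (n+1)) := by
          cases hp : sdP L n with
          | some p => rw [hp] at ihm; omega
          | none => rw [hp] at ihm; omega
        have hone : List.count (sdM L n) [sdC L ((n:Int)+1)] = 1 := by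
          simp [h2]
        rw [List.count_append, hone]
        omega
      · have hP : sdP L (n+1) = sdP L n := by simp [sdP, h1, h2]
        refine ⟨hb, ?_⟩
        rw [hP, hM, hsucc]
        have hone : List.count (sdM L n) [sdC L ((n:Int)+1)] = 0 := by
          simp only [List.count_singleton, beq_iff_eq]
          simp [h2]
        cases hp : sdP L n with
        | some p =>
          rw [hp] at ihm
          obtain ⟨hc, hi⟩ := ihm
          refine ⟨by rw [List.count_append, hone, hc], ?_⟩
          obtain ⟨hplen, hp1, hp2⟩ := List.idxOf?_eq_some_iff.mp hi
          have hp' : p < n + 1 := by simpa [sdCs_length] using hplen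
          refine List.idxOf?_eq_some_iff.mpr ⟨by simp [sdCs_length]; omega, ?_, ?_⟩
          · rw [List.getElem_append_left hplen]
            exact hp1
          · intro j hj
            rw [List.getElem_append_left (by omega)]
            exact hp2 j hj
        | none =>
          rw [hp] at ihm
          rw [List.count_append, hone]
          omega

lemma counts_eq (s : String) :
    (PySem.List.pyRange 0 12 1).map (fun i =>
      (((PySem.List.slice s.toList (some i) (some (i + 6))).zip "AGGAGG".toList).map
        (fun ab => if ab.1 != ab.2 then (1 : Int) else 0)).sum)
    = sdCs s.toList 12 := by
  have h : PySem.List.pyRange 0 12 1 = (List.range 12).map (fun k => (Nat.cast k : Int)) := by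
    have h12 := PySem.List.pyRange_zero_natCast 12
    norm_num at h12
    exact h12
  rw [h, List.map_map]
  refine List.map_congr_left ?_
  intro k _
  simp only [Function.comp]
  rw [PySem.List.sum_map_ite_one_zero]
  rfl

-- ===== VERDICT (by name: the statement is the Claim_ definition above) =====
theorem shine_dalgarno_spec : Claim_equal_shine_dalgarno := by
  intro s _
  unfold Spec_shine_dalgarno shine_dalgarno shine_dalgarno_alt
  have hA := sdA_fold s 11
  norm_num at hA
  rw [show ((17 - 6 + 1 : Int)) = (12 : Int) from by norm_num, hA, counts_eq]
  dsimp only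
  have hmin := sdMin s.toList 11
  norm_num at hmin
  rw [hmin]
  obtain ⟨-, hinv⟩ := sdInv s.toList 11
  norm_num at hinv
  cases hp : sdP s.toList 11 with
  | some p =>
    rw [hp] at hinv
    obtain ⟨hc, hi⟩ := hinv
    have h1 : ¬ (PySem.List.count (sdCs s.toList 12) (sdM s.toList 11) ≠ 1) := by
      simp [PySem.List.count, hc]
    simp only [Option.getD_some, h1, if_false]
    rw [show PySem.List.index? (sdCs s.toList 12) (sdM s.toList 11) = some p from hi]
    simp
  | none =>
    rw [hp] at hinv
    simp
    intro hc
    simp only [] at hinv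
    omega
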